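-- pv_equiv track=rewrite | github.com/UKGANG/Leetcode | other/StackStabilizationChapter1.py | getMinimumDeflatedDiscCount
-- ===== SOURCE A (Python) =====
-- from typing import List
--
-- def getMinimumDeflatedDiscCount(N: int, R: List[int]) -> int:
--     res = 0
--     while True:
--         found = False
--         for i in range(N - 1):
--             idx = N - i - 2
--             if R[idx] >= R[idx + 1]:
--                 R[idx] = R[idx + 1] - 1
--                 if R[idx] <= 0:
--                     return -1
--                 res += 1
--                 found = True
--         if not found:
--             break
--     return res
-- ===== SOURCE B (Python) =====
-- from typing import List
--
-- def getMinimumDeflatedDiscCount(N: int, R: List[int]) -> int: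
--     res = 0
--     if N >= 2:
--         ceiling = R[N - 1]
--         for idx in range(N - 2, -1, -1):
--             if R[idx] >= ceiling:
--                 ceiling -= 1
--                 R[idx] = ceiling
--                 if ceiling <= 0:
--                     return -1
--                 res += 1
--             else:
--                 ceiling = R[idx]
--     return res
-- ===== Notes on version B (the rewrite author's own statement) =====
-- stated objective: simpler
-- what changed: Replaces A's converge-until-stable outer while-loop (re-scanning and re-reading R[idx+1] from the mutated list each pass) with a single right-to-left pass that maintains a local ceiling variable equal to the finalized value to the right.
import Mathlib
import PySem

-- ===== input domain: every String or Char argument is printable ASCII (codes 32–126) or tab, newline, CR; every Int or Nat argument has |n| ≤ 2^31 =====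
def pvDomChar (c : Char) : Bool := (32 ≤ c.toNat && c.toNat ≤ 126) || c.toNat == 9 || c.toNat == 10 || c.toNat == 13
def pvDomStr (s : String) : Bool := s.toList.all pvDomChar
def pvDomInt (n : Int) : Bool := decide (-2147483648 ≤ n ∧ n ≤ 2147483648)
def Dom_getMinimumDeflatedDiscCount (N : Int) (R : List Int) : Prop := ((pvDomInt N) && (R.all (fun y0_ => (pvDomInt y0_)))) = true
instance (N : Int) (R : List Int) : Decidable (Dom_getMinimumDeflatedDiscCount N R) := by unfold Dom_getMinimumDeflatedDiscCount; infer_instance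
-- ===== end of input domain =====

-- B replaces A's converge-until-stable outer while-loop with a single right-to-left
-- pass keeping a local `ceiling` variable; equivalence is about the RETURN value
-- (both versions mutate R in place in Python; the mutation happens to coincide too,
-- but only the return value is claimed here).

-- ===== PORT A =====
-- xs[i] for an in-range index (Pre_ guarantees in-range; .getD 0 is never hit inside Pre_)
def pvGetD (R : List Int) (i : Int) : Int := (PySem.List.pyGet? R i).getD 0

-- the inner 'for i in range(N-1)' loop, over the list of idx = N - i - 2 values;
-- none = the early 'return -1'; state is (R, res, found)
def pvLoopA : List Int → List Int → Int → Bool → Option (List Int × Int × Bool)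
  | [], R, res, found => some (R, res, found)
  | idx :: rest, R, res, found =>
    if pvGetD R idx ≥ pvGetD R (idx + 1) then
      let newv := pvGetD R (idx + 1) - 1
      let R' := R.set idx.toNat newv          -- idx ≥ 0 whenever the loop body runs
      if newv ≤ 0 then none
      else pvLoopA rest R' (res + 1) true
    else pvLoopA rest R res found

def pvIdxsA (N : Int) : List Int := (PySem.List.pyRange 0 (N - 1) 1).map (fun i => N - i - 2)

-- the 'while True' loop; fuel is only a totality guard (the Python loop runs at
-- most two passes: after a pass with changes the prefix is strictly increasing)
def pvWhileA : Nat → Int → List Int → Int → Int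
  | 0, _, _, res => res
  | fuel + 1, N, R, res =>
    match pvLoopA (pvIdxsA N) R res false with
    | none => -1
    | some (R', res', found) => if found then pvWhileA fuel N R' res' else res'

def getMinimumDeflatedDiscCount (N : Int) (R : List Int) : Int :=
  pvWhileA (R.length + 2) N R 0

-- ===== PORT B =====
-- B's single right-to-left pass: state is (R, ceiling, res); none = 'return -1'
def pvLoopB : List Int → List Int → Int → Int → Option (List Int × Int × Int)
  | [], R, c, res => some (R, c, res)
  | idx :: rest, R, c, res =>
    if pvGetD R idx ≥ c then
      let c' := c - 1
      let R' := R.set idx.toNat c'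
      if c' ≤ 0 then none
      else pvLoopB rest R' c' (res + 1)
    else pvLoopB rest R (pvGetD R idx) res

def getMinimumDeflatedDiscCount_alt (N : Int) (R : List Int) : Int :=
  if N ≥ 2 then
    match pvLoopB (PySem.List.pyRange (N - 2) (-1) (-1)) R (pvGetD R (N - 1)) 0 with
    | none => -1
    | some (_, _, res) => res
  else 0

-- ===== PRECONDITION & SPEC =====
-- A raises IndexError exactly when N ≥ 2 and R has fewer than N elements (the
-- first read is R[N-1]); those inputs are excluded, everything else is admitted.
def Pre_getMinimumDeflatedDiscCount (N : Int) (R : List Int) : Prop :=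
  N ≤ (R.length : Int) ∨ N ≤ 1
instance (N : Int) (R : List Int) : Decidable (Pre_getMinimumDeflatedDiscCount N R) := by unfold Pre_getMinimumDeflatedDiscCount; infer_instance

def pvWitness_getMinimumDeflatedDiscCount : Int × List Int := (3, [1, 5, 3])

def Spec_getMinimumDeflatedDiscCount (N : Int) (R : List Int) (out : Int) : Prop := out = getMinimumDeflatedDiscCount_alt N R
instance (N : Int) (R : List Int) (out : Int) : Decidable (Spec_getMinimumDeflatedDiscCount N R out) := by unfold Spec_getMinimumDeflatedDiscCount; infer_instance

-- ===== CLAIM (what is proved, stated in full; the proofs are below) =====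
def Claim_equal_getMinimumDeflatedDiscCount : Prop := ∀ (N : Int) (R : List Int), Dom_getMinimumDeflatedDiscCount N R → Pre_getMinimumDeflatedDiscCount N R → Spec_getMinimumDeflatedDiscCount N R (getMinimumDeflatedDiscCount N R)


-- ===== LEMMAS AND PROOFS =====

-- the descending index list [k, k-1, …, 0] both loops traverse
def pvDesc : Nat → List Int
  | 0 => [(0 : Int)]
  | k + 1 => ((k + 1 : Nat) : Int) :: pvDesc k

lemma pvGetD_natCast (R : List Int) (k : Nat) : pvGetD R (k : Int) = R.getD k 0 := by
  simp [pvGetD, PySem.List.pyGet?_natCast, List.getD_eq_getElem?_getD]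

lemma pvGetD_set_eq (R : List Int) (m : Nat) (i : Int) (v : Int)
    (hi : i = (m : Int)) (hm : m < R.length) : pvGetD (R.set m v) i = v := by
  subst hi
  simp [pvGetD_natCast, List.getD_eq_getElem?_getD, List.getElem?_set_self, hm]

lemma pvGetD_set_ne (R : List Int) (m : Nat) (i : Int) (v : Int)
    (h0 : 0 ≤ i) (hne : i ≠ (m : Int)) : pvGetD (R.set m v) i = pvGetD R i := by
  obtain ⟨j, rfl⟩ := Int.eq_ofNat_of_zero_le h0
  have hj : m ≠ j := by omega
  simp [pvGetD_natCast, List.getD_eq_getElem?_getD, List.getElem?_set_ne hj]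

lemma pvDesc_eq_range_map (n : Nat) :
    pvDesc n = (List.range (n + 1)).map (fun k : Nat => (n : Int) - (k : Int)) := by
  induction n with
  | zero => simp [pvDesc]
  | succ n ih =>
    conv_rhs => rw [List.range_succ_eq_map, List.map_cons, List.map_map]
    rw [pvDesc, ih]
    refine List.cons_eq_cons.mpr ⟨by norm_num, ?_⟩
    apply List.map_congr_left
    intro k _
    simp only [Function.comp_apply, Nat.succ_eq_add_one]
    push_cast; ring

lemma pvIdxsA_desc (n : Nat) : pvIdxsA ((n : Int) + 2) = pvDesc n := by
  rw [pvIdxsA, pvDesc_eq_range_map, PySem.List.pyRange_one]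
  have h1 : ((n : Int) + 2 - 1 - 0).toNat = n + 1 := by omega
  rw [h1, List.map_map]
  apply List.map_congr_left
  intro k _
  simp only [Function.comp_apply]
  push_cast; ring

lemma pvRangeB_desc (n : Nat) : PySem.List.pyRange ((n : Int)) (-1) (-1) = pvDesc n := by
  induction n with
  | zero =>
    rw [PySem.List.pyRange_neg_one_cons (by norm_num)]
    rw [PySem.List.pyRange_neg_one_eq_nil (by norm_num)]
    rfl
  | succ n ih =>
    rw [PySem.List.pyRange_neg_one_cons (by push_cast; omega)]
    have h2 : ((n : Int) + 1 - 1) = (n : Int) := by ring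
    rw [pvDesc]
    push_cast
    rw [h2, ih]

lemma pvLoopB_mono : ∀ (l R : List Int) (c res : Int) (R' : List Int) (c' res' : Int),
    pvLoopB l R c res = some (R', c', res') → res ≤ res' := by
  intro l
  induction l with
  | nil => intro R c res R' c' res' h; simp [pvLoopB] at h; omega
  | cons idx rest ih =>
    intro R c res R' c' res' h
    simp only [pvLoopB] at h
    split at h
    · split at h
      · exact absurd h (by simp)
      · have := ih _ _ _ _ _ _ h; omega
    · exact ih _ _ _ _ _ _ h

-- one working pass of A equals B's ceiling pass (the ceiling is the current
-- value of the slot to the right of the next index)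
lemma pvLoopAB (k : Nat) : ∀ (R : List Int) (res : Int) (found : Bool),
    k + 2 ≤ R.length →
    pvLoopA (pvDesc k) R res found =
      (match pvLoopB (pvDesc k) R (pvGetD R ((k : Int) + 1)) res with
       | none => none
       | some (R', _, res') => some (R', res', found || decide (res < res'))) := by
  induction k with
  | zero =>
    intro R res found h
    simp only [pvDesc, pvLoopA, pvLoopB]
    push_cast
    by_cases hc : pvGetD R 0 ≥ pvGetD R 1
    · rw [if_pos hc, if_pos hc]
      by_cases hz : pvGetD R 1 - 1 ≤ 0
      · rw [if_pos hz, if_pos hz]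
      · rw [if_neg hz, if_neg hz]
        have hlt : res < res + 1 := by omega
        simp [pvLoopA, hlt]
    · rw [if_neg hc, if_neg hc]
      simp [pvLoopA]
  | succ k ih =>
    intro R res found h
    simp only [pvDesc, pvLoopA, pvLoopB]
    push_cast
    by_cases hc : pvGetD R ((k : Int) + 1) ≥ pvGetD R ((k : Int) + 1 + 1)
    · rw [if_pos hc, if_pos hc]
      by_cases hz : pvGetD R ((k : Int) + 1 + 1) - 1 ≤ 0
      · rw [if_pos hz, if_pos hz]
      · rw [if_neg hz, if_neg hz]
        have htn : ((k : Int) + 1).toNat = k + 1 := by omega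
        rw [htn]
        set newv := pvGetD R ((k : Int) + 1 + 1) - 1 with hnv
        set R1 := R.set (k + 1) newv with hR1
        have hlen : k + 2 ≤ R1.length := by rw [hR1, List.length_set]; omega
        have hget : pvGetD R1 ((k : Int) + 1) = newv :=
          pvGetD_set_eq R (k + 1) _ newv (by push_cast; ring) (by omega)
        have hih := ih R1 (res + 1) true hlen
        rw [hget] at hih
        rw [hih]
        cases hB : pvLoopB (pvDesc k) R1 newv (res + 1) with
        | none => rfl
        | some t =>
          obtain ⟨R'', c'', res''⟩ := t
          have hm := pvLoopB_mono _ _ _ _ _ _ _ hB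
          have h1 : decide (res < res'') = true := by simp; omega
          simp [h1]
    · rw [if_neg hc, if_neg hc]
      exact ih R res found (by omega)

-- a pass only writes indices ≤ k, keeps the length, and leaves the touched
-- prefix strictly increasing
lemma pvLoopA_post (k : Nat) : ∀ (R : List Int) (res : Int) (found : Bool)
    (R' : List Int) (res' : Int) (f : Bool),
    k + 2 ≤ R.length →
    pvLoopA (pvDesc k) R res found = some (R', res', f) →
    (∀ j : Nat, k < j → pvGetD R' (j : Int) = pvGetD R (j : Int)) ∧ R'.length = R.length ∧
      (∀ i : Nat, i ≤ k → pvGetD R' (i : Int) < pvGetD R' ((i : Int) + 1)) := by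
  induction k with
  | zero =>
    intro R res found R' res' f h hA
    simp only [pvDesc, pvLoopA] at hA
    split at hA
    · rename_i hc
      split at hA
      · exact absurd hA (by simp)
      · rename_i hz
        simp only [pvLoopA, Option.some.injEq, Prod.mk.injEq] at hA
        obtain ⟨rfl, rfl, rfl⟩ := hA
        refine ⟨?_, by simp, ?_⟩
        · intro j hj
          exact pvGetD_set_ne R _ _ _ (by omega) (by simp; omega)
        · intro i hi
          interval_cases i
          have e1 : pvGetD (R.set (Int.toNat 0) (pvGetD R (0 + 1) - 1)) ((0 : Nat) : Int)
              = pvGetD R (0 + 1) - 1 :=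
            pvGetD_set_eq R _ _ _ (by simp) (by omega)
          have e2 : pvGetD (R.set (Int.toNat 0) (pvGetD R (0 + 1) - 1)) (((0 : Nat) : Int) + 1)
              = pvGetD R (((0 : Nat) : Int) + 1) :=
            pvGetD_set_ne R _ _ _ (by omega) (by simp)
          rw [e1, e2]
          push_cast
          omega
    · rename_i hc
      simp only [pvLoopA, Option.some.injEq, Prod.mk.injEq] at hA
      obtain ⟨rfl, rfl, rfl⟩ := hA
      refine ⟨fun j _ => rfl, rfl, ?_⟩
      intro i hi
      interval_cases i
      push_cast
      exact lt_of_not_ge hc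
  | succ k ih =>
    intro R res found R' res' f h hA
    simp only [pvDesc, pvLoopA] at hA
    push_cast at hA
    split at hA
    · rename_i hc
      split at hA
      · exact absurd hA (by simp)
      · rename_i hz
        have htn : ((k : Int) + 1).toNat = k + 1 := by omega
        rw [htn] at hA
        set newv := pvGetD R ((k : Int) + 1 + 1) - 1 with hnv
        set R1 := R.set (k + 1) newv with hR1
        have hlen1 : R1.length = R.length := by rw [hR1, List.length_set]
        obtain ⟨hunch, hlen, hinc⟩ := ih R1 (res + 1) true R' res' f (by omega) hA
        refine ⟨?_, by omega, ?_⟩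
        · intro j hj
          rw [hunch j (by omega), hR1]
          exact pvGetD_set_ne R _ _ _ (by omega) (by push_cast; omega)
        · intro i hi
          rcases Nat.lt_or_ge i (k + 1) with hik | hik
          · exact hinc i (by omega)
          · have hieq : i = k + 1 := by omega
            subst hieq
            have e1 : pvGetD R' ((k + 1 : Nat) : Int) = newv := by
              rw [hunch (k + 1) (by omega), hR1]
              exact pvGetD_set_eq R _ _ _ (by push_cast; ring) (by omega)
            have e2 : pvGetD R' (((k + 1 : Nat) : Int) + 1) = pvGetD R ((k : Int) + 1 + 1) := by
              have hcast : (((k + 1 : Nat) : Int) + 1) = ((k + 2 : Nat) : Int) := by push_cast; ring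
              rw [hcast, hunch (k + 2) (by omega), hR1]
              rw [pvGetD_set_ne R _ _ _ (by omega) (by push_cast; omega)]
              have : ((k + 2 : Nat) : Int) = ((k : Int) + 1 + 1) := by push_cast; ring
              rw [this]
            rw [e1, e2]
            omega
    · rename_i hc
      obtain ⟨hunch, hlen, hinc⟩ := ih R res found R' res' f (by omega) hA
      refine ⟨fun j hj => hunch j (by omega), hlen, ?_⟩
      intro i hi
      rcases Nat.lt_or_ge i (k + 1) with hik | hik
      · exact hinc i (by omega)
      · have hieq : i = k + 1 := by omega
        subst hieq
        have e1 : pvGetD R' ((k + 1 : Nat) : Int) = pvGetD R ((k + 1 : Nat) : Int) :=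
          hunch (k + 1) (by omega)
        have e2 : pvGetD R' (((k + 1 : Nat) : Int) + 1) = pvGetD R ((k : Int) + 1 + 1) := by
          have hcast : (((k + 1 : Nat) : Int) + 1) = ((k + 2 : Nat) : Int) := by push_cast; ring
          rw [hcast, hunch (k + 2) (by omega)]
          have : ((k + 2 : Nat) : Int) = ((k : Int) + 1 + 1) := by push_cast; ring
          rw [this]
        rw [e1, e2]
        have : ((k + 1 : Nat) : Int) = ((k : Int) + 1) := by push_cast; ring
        rw [this]
        omega

-- on a strictly increasing prefix a pass of A changes nothing
lemma pvLoopA_noop (k : Nat) : ∀ (R : List Int) (res : Int) (found : Bool),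
    (∀ i : Nat, i ≤ k → pvGetD R (i : Int) < pvGetD R ((i : Int) + 1)) →
    pvLoopA (pvDesc k) R res found = some (R, res, found) := by
  induction k with
  | zero =>
    intro R res found hinc
    have h0 := hinc 0 (by omega)
    simp only [pvDesc, pvLoopA]
    push_cast at h0 ⊢
    rw [if_neg (by omega)]
  | succ k ih =>
    intro R res found hinc
    have hk := hinc (k + 1) (by omega)
    simp only [pvDesc, pvLoopA]
    push_cast
    rw [if_neg (by push_cast at hk; omega)]
    exact ih R res found (fun i hi => hinc i (by omega))

-- ===== VERDICT (by name: the statement is the Claim_ definition above) =====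
theorem getMinimumDeflatedDiscCount_spec : Claim_equal_getMinimumDeflatedDiscCount := by
  intro N R _hdom hpre
  unfold Spec_getMinimumDeflatedDiscCount
  by_cases hN : N ≥ 2
  · -- N ≥ 2 and (by Pre_) N ≤ R.length
    have hNlen : N ≤ (R.length : Int) := by
      rcases hpre with h | h
      · exact h
      · omega
    obtain ⟨n, hn⟩ : ∃ n : Nat, N = (n : Int) + 2 := ⟨(N - 2).toNat, by omega⟩
    subst hn
    have hlen : n + 2 ≤ R.length := by exact_mod_cast (by omega : ((n : Int) + 2) ≤ (R.length : Int))
    have hidx : pvIdxsA ((n : Int) + 2) = pvDesc n := pvIdxsA_desc n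
    have hrng : PySem.List.pyRange ((n : Int) + 2 - 2) (-1) (-1) = pvDesc n := by
      rw [show ((n : Int) + 2 - 2) = (n : Int) from by ring]; exact pvRangeB_desc n
    have hceil : ((n : Int) + 2 - 1) = ((n : Int) + 1) := by ring
    have hAB := pvLoopAB n R 0 false hlen
    unfold getMinimumDeflatedDiscCount getMinimumDeflatedDiscCount_alt
    rw [if_pos hN, hrng, hceil]
    show pvWhileA (R.length + 1 + 1) ((n : Int) + 2) R 0 = _
    rw [pvWhileA, hidx, hAB]
    cases hB : pvLoopB (pvDesc n) R (pvGetD R ((n : Int) + 1)) 0 with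
    | none => rfl
    | some t =>
      obtain ⟨R'', c'', res''⟩ := t
      show (if (false || decide ((0 : Int) < res'')) = true
            then pvWhileA (R.length + 1) ((n : Int) + 2) R'' res'' else res'') = res''
      by_cases hf : (0 : Int) < res''
      · rw [if_pos (by simp [hf])]
        -- second pass is a no-op: the prefix is strictly increasing after pass 1
        have hA1 : pvLoopA (pvDesc n) R 0 false = some (R'', res'', false || decide (0 < res'')) := by
          rw [hAB, hB]
        obtain ⟨_, hlen2, hinc⟩ := pvLoopA_post n R 0 false R'' res'' _ hlen hA1
        cases hfuel : R.length with
        | zero => omega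
        | succ m =>
          show pvWhileA (m + 1 + 1) ((n : Int) + 2) R'' res'' = res''
          rw [pvWhileA, hidx, pvLoopA_noop n R'' res'' false hinc]
          rfl
      · rw [if_neg (by simp [hf])]
  · -- N < 2 : the inner range is empty, both return 0 (res)
    have hnil : pvIdxsA N = [] := by
      rw [pvIdxsA, PySem.List.pyRange_one_eq_nil (by omega)]
      rfl
    unfold getMinimumDeflatedDiscCount getMinimumDeflatedDiscCount_alt
    rw [if_neg hN]
    show pvWhileA (R.length + 1 + 1) N R 0 = 0
    rw [pvWhileA, hnil]
    rfl
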